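-- pv_equiv track=rewrite | github.com/SErothompson/face_tracker | app/blueprints/reports/generators.py | organize_regimen
-- ===== SOURCE A (Python) =====
-- def organize_regimen(regimen_list):
--     """Organize regimen by time of day."""
--     organized = {
--         'AM': [],
--         'PM': [],
--         'Treatments': []
--     }
--
--     for product in regimen_list:
--         time_of_day = product.get('time_of_day', 'Treatments')
--         if time_of_day not in organized:
--             time_of_day = 'Treatments'
--         organized[time_of_day].append(product)
--
--     return organized
-- ===== SOURCE B (Python) =====
-- def organize_regimen(regimen_list):
--     """Organize regimen by time of day (three classifying passes)."""
--     tod = lambda p: p.get('time_of_day', 'Treatments')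
--     return {
--         'AM': [p for p in regimen_list if tod(p) == 'AM'],
--         'PM': [p for p in regimen_list if tod(p) == 'PM'],
--         'Treatments': [p for p in regimen_list if tod(p) not in ('AM', 'PM')],
--     }
-- ===== Notes on version B (the rewrite author's own statement) =====
-- stated objective: alternative
-- what changed: Replaces the single dispatching loop that mutates a pre-built bucket dict with three independent filtered passes that build each bucket's list directly.
import Mathlib
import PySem

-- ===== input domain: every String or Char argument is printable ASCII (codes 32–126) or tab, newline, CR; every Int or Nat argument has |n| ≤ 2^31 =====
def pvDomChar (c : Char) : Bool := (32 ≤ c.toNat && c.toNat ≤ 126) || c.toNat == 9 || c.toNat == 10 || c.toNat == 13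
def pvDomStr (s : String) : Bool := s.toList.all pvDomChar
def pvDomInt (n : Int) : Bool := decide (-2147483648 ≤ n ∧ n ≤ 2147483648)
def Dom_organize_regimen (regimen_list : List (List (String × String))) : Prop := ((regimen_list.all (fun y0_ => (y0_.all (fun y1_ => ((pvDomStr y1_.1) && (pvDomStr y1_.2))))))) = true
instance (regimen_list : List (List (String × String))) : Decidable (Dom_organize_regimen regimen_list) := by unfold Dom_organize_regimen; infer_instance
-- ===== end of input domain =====

-- B replaces A's single dispatching loop over a mutable bucket dict with three independent filtered passes; equal cost, different structure.


-- ===== PORT A =====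
-- product.get('time_of_day', 'Treatments') (shared by both ports)
def pvTod (p : List (String × String)) : String :=
  (PySem.Dict.mk p).getD "time_of_day" "Treatments"

def organize_regimen (regimen_list : List (List (String × String))) : List (String × List (List (String × String))) :=
  let organized : PySem.Dict String (List (List (String × String))) :=
    PySem.Dict.ofList [("AM", []), ("PM", []), ("Treatments", [])]
  (regimen_list.foldl (fun d product =>
    let time_of_day := pvTod product
    let time_of_day := if d.contains time_of_day then time_of_day else "Treatments"
    d.modify time_of_day [] (· ++ [product])) organized).items

-- ===== PORT B =====
def organize_regimen_alt (regimen_list : List (List (String × String))) : List (String × List (List (String × String))) :=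
  [("AM", regimen_list.filter (fun p => pvTod p == "AM")),
   ("PM", regimen_list.filter (fun p => pvTod p == "PM")),
   ("Treatments", regimen_list.filter (fun p => pvTod p != "AM" && pvTod p != "PM"))]

-- ===== PRECONDITION & SPEC =====
def Spec_organize_regimen (regimen_list : List (List (String × String))) (out : List (String × List (List (String × String)))) : Prop := out = organize_regimen_alt regimen_list
instance (regimen_list : List (List (String × String))) (out : List (String × List (List (String × String)))) : Decidable (Spec_organize_regimen regimen_list out) := by unfold Spec_organize_regimen; infer_instance

-- ===== CLAIM (what is proved, stated in full; the proofs are below) =====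
def Claim_equal_organize_regimen : Prop := ∀ (regimen_list : List (List (String × String))), Dom_organize_regimen regimen_list → Spec_organize_regimen regimen_list (organize_regimen regimen_list)

-- ===== LEMMAS AND PROOFS =====

set_option maxRecDepth 4000

-- one step of A's loop on the three-bucket dict, written as a literal dict update
theorem pvStep (p : List (String × String)) (a b c : List (List (String × String))) :
    (let time_of_day := pvTod p
     let time_of_day := if (PySem.Dict.mk [("AM", a), ("PM", b), ("Treatments", c)]).contains time_of_day then time_of_day else "Treatments"
     (PySem.Dict.mk [("AM", a), ("PM", b), ("Treatments", c)]).modify time_of_day [] (· ++ [p])) =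
    PySem.Dict.mk [("AM", if pvTod p == "AM" then a ++ [p] else a),
                   ("PM", if pvTod p == "PM" then b ++ [p] else b),
                   ("Treatments", if pvTod p != "AM" && pvTod p != "PM" then c ++ [p] else c)] := by
  generalize pvTod p = t
  by_cases hAM : t = "AM"
  · simp [hAM, PySem.Dict.contains, PySem.Dict.modify, PySem.Dict.insert,
      PySem.Dict.getD, PySem.Dict.get?, PySem.Dict.items]
  · by_cases hPM : t = "PM"
    · simp [hPM, hAM, PySem.Dict.contains, PySem.Dict.modify, PySem.Dict.insert,
        PySem.Dict.getD, PySem.Dict.get?, PySem.Dict.items]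
    · have hAM' : ¬ ("AM" = t) := fun h => hAM h.symm
      have hPM' : ¬ ("PM" = t) := fun h => hPM h.symm
      by_cases hT : t = "Treatments"
      · simp [hT, hAM, hPM, PySem.Dict.contains, PySem.Dict.modify, PySem.Dict.insert,
          PySem.Dict.getD, PySem.Dict.get?, PySem.Dict.items]
      · have hT' : ¬ ("Treatments" = t) := fun h => hT h.symm
        simp [hAM, hPM, hT, hAM', hPM', hT', PySem.Dict.contains, PySem.Dict.modify,
          PySem.Dict.insert, PySem.Dict.getD, PySem.Dict.get?, PySem.Dict.items]

-- loop invariant: folding A's step from a three-bucket dict appends each filtered class to its bucket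
theorem organize_regimen_inv (xs : List (List (String × String)))
    (a b c : List (List (String × String))) :
    (xs.foldl (fun d product =>
      let time_of_day := pvTod product
      let time_of_day := if d.contains time_of_day then time_of_day else "Treatments"
      d.modify time_of_day [] (· ++ [product]))
      (PySem.Dict.mk [("AM", a), ("PM", b), ("Treatments", c)])).items =
    [("AM", a ++ xs.filter (fun p => pvTod p == "AM")),
     ("PM", b ++ xs.filter (fun p => pvTod p == "PM")),
     ("Treatments", c ++ xs.filter (fun p => pvTod p != "AM" && pvTod p != "PM"))] := by
  induction xs generalizing a b c with
  | nil => simp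
  | cons p xs ih =>
    rw [List.foldl_cons, pvStep, ih]
    by_cases hAM : pvTod p = "AM"
    · simp [List.filter_cons, hAM]
    · by_cases hPM : pvTod p = "PM"
      · simp [List.filter_cons, hPM, hAM]
      · simp [List.filter_cons, hAM, hPM]

-- ===== VERDICT (by name: the statement is the Claim_ definition above) =====
theorem organize_regimen_spec : Claim_equal_organize_regimen := by
  intro xs _
  show organize_regimen xs = organize_regimen_alt xs
  simpa [organize_regimen, organize_regimen_alt, PySem.Dict.ofList] using
    organize_regimen_inv xs [] [] []
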